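-- pv_equiv track=rewrite | github.com/tuhocit144/AIO_Exercies | day3.section7.py | tokeNization
-- ===== SOURCE A (Python) =====
-- def tokeNization(data):
--     result = []
--     rows = len(data)
--     for id in range(rows):
--         words = data[id].split(' ')
--         result.extend(words)
--     # loại bỏ từ trùng nhau
--     vocabulary = []
--     [vocabulary.append(x) for x in result if x not in vocabulary]
--     vocabulary.sort()
--     return vocabulary
-- ===== SOURCE B (Python) =====
-- def tokeNization(data):
--     words = []
--     for row in data:
--         words += row.split(' ')
--     words.sort()
--     vocabulary = []
--     for w in words:
--         if not vocabulary or vocabulary[-1] != w: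
--             vocabulary.append(w)
--     return vocabulary
-- ===== Notes on version B (the rewrite author's own statement) =====
-- stated objective: faster
-- what changed: Replaces A's per-word 'x not in vocabulary' linear membership scan (quadratic dedup) followed by a sort with: flatten once, sort the full word list once, then dedup in a single adjacency pass over the sorted list.
import Mathlib
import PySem

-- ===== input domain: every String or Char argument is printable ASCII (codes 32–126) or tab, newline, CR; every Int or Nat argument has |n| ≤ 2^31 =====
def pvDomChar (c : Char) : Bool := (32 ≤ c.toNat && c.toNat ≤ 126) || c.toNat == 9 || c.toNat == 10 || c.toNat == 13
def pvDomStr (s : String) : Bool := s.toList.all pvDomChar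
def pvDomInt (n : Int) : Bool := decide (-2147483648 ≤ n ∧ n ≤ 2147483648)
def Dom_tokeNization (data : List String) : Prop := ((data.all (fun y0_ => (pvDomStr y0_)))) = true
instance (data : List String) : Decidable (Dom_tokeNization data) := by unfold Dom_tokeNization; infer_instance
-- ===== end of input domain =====

-- B flattens once, sorts the multiset of words once, and removes duplicates by a single
-- adjacency scan — no repeated 'x not in vocabulary' membership scans (objective: faster).

-- ===== PORT A =====
def tokeNization (data : List String) : List String :=
  let rows : Int := PySem.List.len data
  let result : List String :=
    (PySem.List.pyRange 0 rows).foldl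
      (fun acc id => acc ++ ((PySem.Str.split? (PySem.List.pyGetD data id "") " ").getD [])) []
  let vocabulary : List String :=
    result.foldl (fun v x => if v.contains x then v else v ++ [x]) []
  PySem.List.sorted vocabulary (fun x => x)

-- ===== PORT B =====
def tokeNization_alt (data : List String) : List String :=
  let words : List String :=
    data.foldl (fun acc row => acc ++ ((PySem.Str.split? row " ").getD [])) []
  let ws := PySem.List.sorted words (fun x => x)
  ws.foldl (fun v w => if v.getLast? = some w then v else v ++ [w]) []

-- ===== PRECONDITION & SPEC =====
def Spec_tokeNization (data : List String) (out : List String) : Prop := out = tokeNization_alt data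
instance (data : List String) (out : List String) : Decidable (Spec_tokeNization data out) := by unfold Spec_tokeNization; infer_instance

-- ===== CLAIM (what is proved, stated in full; the proofs are below) =====
def Claim_equal_tokeNization : Prop := ∀ (data : List String), Dom_tokeNization data → Spec_tokeNization data (tokeNization data)

-- ===== LEMMAS AND PROOFS =====

-- The adjacency-dedup fold of B equals the membership-dedup fold of A on a ≤-sorted input,
-- and its output is strictly increasing.
theorem foldAdj_eq_foldAdd (l : List String) (acc : List String)
    (hl : l.Pairwise (· ≤ ·)) (hacc : acc.Pairwise (· < ·))
    (hle : ∀ x ∈ acc, ∀ y ∈ l, x ≤ y) :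
    (l.foldl (fun v w => if v.getLast? = some w then v else v ++ [w]) acc
      = l.foldl PySem.Set.add acc)
    ∧ (l.foldl (fun v w => if v.getLast? = some w then v else v ++ [w]) acc).Pairwise (· < ·) := by
  induction l generalizing acc with
  | nil => exact ⟨rfl, hacc⟩
  | cons w t ih =>
    have hlt := (List.pairwise_cons.mp hl).1
    have ht := (List.pairwise_cons.mp hl).2
    by_cases hlast : acc.getLast? = some w
    · have hwmem : w ∈ acc := List.mem_of_getLast? hlast
      have hadd : PySem.Set.add acc w = acc := by
        simp [PySem.Set.add]
        exact hwmem
      simp only [List.foldl_cons, hlast, hadd]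
      exact ih acc ht hacc (fun x hx y hy => hle x hx y (List.mem_cons_of_mem _ hy))
    · have hwnot : w ∉ acc := by
        intro hw
        have hne : acc ≠ [] := by intro h; simp [h] at hw
        have hform : acc.dropLast ++ [acc.getLast hne] = acc := List.dropLast_append_getLast hne
        have hlastle : acc.getLast hne ≤ w := hle _ (List.getLast_mem hne) w (List.mem_cons_self)
        rcases (by rw [← hform] at hw; exact List.mem_append.mp hw) with hwd | hwl
        · -- w strictly before the last element: w < last ≤ w, contradiction
          have : w < acc.getLast hne := by
            have := hacc
            rw [← hform] at this
            exact (List.pairwise_append.mp this).2.2 w hwd _ (List.mem_singleton_self _)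
          exact absurd hlastle (not_le_of_gt this)
        · apply hlast
          simp only [List.mem_singleton] at hwl
          rw [List.getLast?_eq_some_getLast hne, hwl]
      have hadd : PySem.Set.add acc w = acc ++ [w] := by
        simp [PySem.Set.add, hwnot]
      have hacc' : (acc ++ [w]).Pairwise (· < ·) := by
        rw [List.pairwise_append]
        refine ⟨hacc, List.pairwise_singleton _ _, ?_⟩
        intro x hx y hy
        rw [List.mem_singleton] at hy
        rw [hy]
        exact lt_of_le_of_ne (hle x hx w List.mem_cons_self) (fun h => hwnot (h ▸ hx))
      have hle' : ∀ x ∈ acc ++ [w], ∀ y ∈ t, x ≤ y := by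
        intro x hx y hy
        rcases List.mem_append.mp hx with hx | hx
        · exact hle x hx y (List.mem_cons_of_mem _ hy)
        · rw [List.mem_singleton] at hx
          rw [hx]
          exact hlt y hy
      simp only [List.foldl_cons, if_neg hlast, hadd]
      exact ih (acc ++ [w]) ht hacc' hle'

-- ===== VERDICT (by name: the statement is the Claim_ definition above) =====
theorem tokeNization_spec : Claim_equal_tokeNization := by
  intro data _
  unfold Spec_tokeNization
  have hA : tokeNization data
      = PySem.List.sorted
          (List.foldl (fun v x => if v.contains x then v else v ++ [x]) []
            (List.foldl
              (fun acc id => acc ++ ((PySem.Str.split? (PySem.List.pyGetD data id "") " ").getD []))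
              [] (PySem.List.pyRange 0 (PySem.List.len data))))
          (fun x => x) := rfl
  have hB : tokeNization_alt data
      = (PySem.List.sorted
          (List.foldl (fun acc row => acc ++ ((PySem.Str.split? row " ").getD [])) [] data)
          (fun x => x)).foldl
          (fun v w => if v.getLast? = some w then v else v ++ [w]) [] := rfl
  -- the flattened word list is identical on both sides
  have hflat :
      List.foldl
        (fun acc id => acc ++ ((PySem.Str.split? (PySem.List.pyGetD data id "") " ").getD []))
        [] (PySem.List.pyRange 0 (PySem.List.len data))
      = List.foldl (fun acc row => acc ++ ((PySem.Str.split? row " ").getD [])) [] data := by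
    have := PySem.List.foldl_pyRange_pyGetD data ""
      (fun acc row => acc ++ ((PySem.Str.split? row " ").getD [])) [] (a := 0) le_rfl
    simpa using this
  rw [hA, hB, hflat]
  set ws := List.foldl (fun acc row => acc ++ ((PySem.Str.split? row " ").getD [])) [] data with hws
  have hsorted : (PySem.List.sorted ws (fun x => x)).Pairwise (· ≤ ·) :=
    PySem.List.sorted_pairwise ws (fun x => x)
  obtain ⟨heq, hpw⟩ := foldAdj_eq_foldAdd (PySem.List.sorted ws (fun x => x)) []
    hsorted List.Pairwise.nil (by simp)
  rw [heq] at hpw ⊢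
  -- A's vocabulary fold is Set.ofList ws; B's fold on the sorted list is Set.ofList (sorted ws)
  have hvocab : List.foldl (fun v x => if v.contains x then v else v ++ [x]) [] ws
      = PySem.Set.ofList ws := rfl
  have hBfold : List.foldl PySem.Set.add [] (PySem.List.sorted ws (fun x => x))
      = PySem.Set.ofList (PySem.List.sorted ws (fun x => x)) := rfl
  rw [hvocab, hBfold]
  rw [hBfold] at hpw
  -- both sides: the strictly increasing enumeration of the distinct words
  apply PySem.List.sorted_eq_of_perm_of_pairwise_lt
  · refine (List.perm_ext_iff_of_nodup ?_ ?_).mpr ?_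
    · exact PySem.Set.nodup_ofList _
    · exact PySem.Set.nodup_ofList _
    · intro x
      rw [PySem.Set.mem_ofList, PySem.Set.mem_ofList, PySem.List.mem_sorted]
  · exact hpw
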